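-- pv_equiv track=rewrite | github.com/uvewa/american-sentinel-research | verify_accuracy_v2.py | strip_ocr_header
-- ===== SOURCE A (Python) =====
-- def strip_ocr_header(text):
--     lines = text.split('\n')
--     start = 0
--     for i, line in enumerate(lines):
--         if line.strip() == '---':
--             start = i + 1
--             break
--     content_lines = []
--     for line in lines[start:]:
--         if line.strip() == '---':
--             continue
--         content_lines.append(line)
--     return '\n'.join(content_lines).strip()
-- ===== SOURCE B (Python) =====
-- def strip_ocr_header(text):
--     seen_separator = False
--     result = []
--     for line in text.split('\n'):
--         if line.strip() == '---':
--             if not seen_separator: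
--                 seen_separator = True
--                 result = []
--         else:
--             result.append(line)
--     return '\n'.join(result).strip()
-- ===== Notes on version B (the rewrite author's own statement) =====
-- stated objective: simpler
-- what changed: Replaced A's two sequential passes (enumerate+break to find the first separator index, then a slice-and-filter pass) by one stateful pass: a seen_separator flag clears the accumulated result at the first separator line and every separator line is skipped.
import Mathlib
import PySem

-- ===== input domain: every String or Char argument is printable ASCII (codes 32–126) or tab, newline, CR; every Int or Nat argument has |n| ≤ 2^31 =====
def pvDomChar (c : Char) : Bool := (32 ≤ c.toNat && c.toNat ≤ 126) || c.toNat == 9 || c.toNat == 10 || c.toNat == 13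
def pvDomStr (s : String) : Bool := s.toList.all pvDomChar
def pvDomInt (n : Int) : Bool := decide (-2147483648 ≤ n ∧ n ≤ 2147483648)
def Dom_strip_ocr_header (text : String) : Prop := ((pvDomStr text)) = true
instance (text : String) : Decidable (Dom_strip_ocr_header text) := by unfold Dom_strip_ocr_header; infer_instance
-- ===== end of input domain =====

-- B replaces A's two passes (find first '---' index, then slice-and-filter) by one
-- stateful pass whose seen-separator flag clears the accumulator at the first separator line;
-- objective: simpler (one loop instead of two).

-- ===== PORT A =====
-- the 'for i, line in enumerate(lines): … break' loop, ported with an explicit counter i;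
-- returns 0 when no line strips to '---' (start keeps its initial value)
def stripA_start : List String → Nat → Nat
  | [], _ => 0
  | l :: ls, i => if PySem.Str.strip l == "---" then i + 1 else stripA_start ls (i + 1)

def strip_ocr_header (text : String) : String :=
  let lines := (PySem.Str.split? text "\n").getD []  -- text.split('\n'); sep ≠ "" so split? is always some
  let start := stripA_start lines 0
  -- lines[start:] with 0 ≤ start ≤ len(lines): exactly List.drop
  let content_lines := (lines.drop start).foldl
    (fun acc line => if PySem.Str.strip line == "---" then acc else acc ++ [line]) []
  PySem.Str.strip (PySem.Str.join "\n" content_lines)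

-- ===== PORT B =====
-- loop body of Source B: state = (seen_separator, result)
def stripB_step (st : Bool × List String) (line : String) : Bool × List String :=
  if PySem.Str.strip line == "---" then
    (if st.1 = false then (true, []) else st)
  else
    (st.1, st.2 ++ [line])

def strip_ocr_header_alt (text : String) : String :=
  let st := ((PySem.Str.split? text "\n").getD []).foldl stripB_step (false, [])
  PySem.Str.strip (PySem.Str.join "\n" st.2)

-- ===== PRECONDITION & SPEC =====
def Spec_strip_ocr_header (text : String) (out : String) : Prop := out = strip_ocr_header_alt text
instance (text : String) (out : String) : Decidable (Spec_strip_ocr_header text out) := by unfold Spec_strip_ocr_header; infer_instance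

-- ===== CLAIM (what is proved, stated in full; the proofs are below) =====
def Claim_equal_strip_ocr_header : Prop := ∀ (text : String), Dom_strip_ocr_header text → Spec_strip_ocr_header text (strip_ocr_header text)

-- ===== LEMMAS AND PROOFS =====

-- abbreviation for A's second (filter) loop
def stripFilt (acc : List String) (ls : List String) : List String :=
  ls.foldl (fun acc line => if PySem.Str.strip line == "---" then acc else acc ++ [line]) acc

theorem stripB_seen (r : List String) : ∀ acc,
    r.foldl stripB_step (true, acc) = (true, stripFilt acc r) := by
  induction r with
  | nil => intro acc; simp [stripFilt]
  | cons l ls ih =>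
    intro acc
    by_cases h : PySem.Str.strip l = "---"
    · simp [stripB_step, stripFilt, h, ih]
    · simp [stripB_step, stripFilt, h, ih]

theorem stripB_nosep (p : List String) : ∀ acc,
    (∀ l ∈ p, PySem.Str.strip l ≠ "---") →
    p.foldl stripB_step (false, acc) = (false, acc ++ p) := by
  induction p with
  | nil => intro acc _; simp
  | cons l ls ih =>
    intro acc h
    have hl := h l (by simp)
    simp only [List.foldl_cons, stripB_step, beq_iff_eq, if_neg hl]
    rw [ih (acc ++ [l]) (fun x hx => h x (by simp [hx]))]
    simp

theorem stripFilt_nosep (p : List String) : ∀ acc,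
    (∀ l ∈ p, PySem.Str.strip l ≠ "---") →
    stripFilt acc p = acc ++ p := by
  induction p with
  | nil => intro acc _; simp [stripFilt]
  | cons l ls ih =>
    intro acc h
    have hl := h l (by simp)
    simp only [stripFilt, List.foldl_cons, beq_iff_eq, if_neg hl] at *
    rw [ih (acc ++ [l]) (fun x hx => h x (by simp [hx]))]
    simp

theorem stripA_start_nosep (ls : List String) : ∀ i,
    (∀ l ∈ ls, PySem.Str.strip l ≠ "---") →
    stripA_start ls i = 0 := by
  induction ls with
  | nil => intro i _; simp [stripA_start]
  | cons l ls ih =>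
    intro i h
    have hl := h l (by simp)
    simp only [stripA_start, beq_iff_eq, if_neg hl]
    exact ih (i + 1) (fun x hx => h x (by simp [hx]))

theorem stripA_start_sep (ls : List String) : ∀ i,
    (∃ l ∈ ls, PySem.Str.strip l = "---") →
    stripA_start ls i =
      i + (ls.takeWhile (fun l => !(PySem.Str.strip l == "---"))).length + 1 := by
  induction ls with
  | nil => intro i h; simp at h
  | cons l ls ih =>
    intro i h
    by_cases hl : PySem.Str.strip l = "---"
    · simp [stripA_start, hl]
    · have h' : ∃ x ∈ ls, PySem.Str.strip x = "---" := by
        rcases h with ⟨x, hx, hsx⟩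
        rcases List.mem_cons.mp hx with hx | hx
        · exact absurd (hx ▸ hsx) hl
        · exact ⟨x, hx, hsx⟩
      have hb : (PySem.Str.strip l == "---") = false := by simpa using hl
      rw [show stripA_start (l :: ls) i = stripA_start ls (i + 1) by simp [stripA_start, hb]]
      rw [ih (i + 1) h']
      simp [hb]
      omega

theorem dropWhile_head_false {α : Type} (p : α → Bool) :
    ∀ (ls : List α) (s : α) (r : List α), ls.dropWhile p = s :: r → p s = false := by
  intro ls
  induction ls with
  | nil => intro s r h; simp [List.dropWhile] at h
  | cons a as ih =>
    intro s r h
    by_cases hp : p a = true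
    · rw [List.dropWhile_cons_of_pos hp] at h
      exact ih s r h
    · rw [List.dropWhile_cons_of_neg hp] at h
      cases h
      simpa using hp

theorem strip_main (ls : List String) :
    stripFilt [] (ls.drop (stripA_start ls 0)) = (ls.foldl stripB_step (false, [])).2 := by
  by_cases h : ∃ l ∈ ls, PySem.Str.strip l = "---"
  · -- there IS a separator line: split at the first one
    set pred : String → Bool := fun l => !(PySem.Str.strip l == "---") with hpred
    have hsplit : ls.takeWhile pred ++ ls.dropWhile pred = ls := List.takeWhile_append_dropWhile
    have hp : ∀ l ∈ ls.takeWhile pred, PySem.Str.strip l ≠ "---" := by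
      intro l hl
      have := List.mem_takeWhile_imp hl
      simpa [hpred] using this
    have hd : ls.dropWhile pred ≠ [] := by
      intro hnil
      rcases h with ⟨x, hx, hsx⟩
      rw [← hsplit] at hx
      simp [hnil] at hx
      exact (hp x hx) hsx
    obtain ⟨s, r, hsr⟩ := List.exists_cons_of_ne_nil hd
    have hs : PySem.Str.strip s = "---" := by
      have := dropWhile_head_false pred ls s r hsr
      simpa [hpred] using this
    have hstart : stripA_start ls 0 = (ls.takeWhile pred).length + 1 := by
      rw [stripA_start_sep ls 0 h]; simp [hpred]
    rw [hsr] at hsplit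
    generalize hq : ls.takeWhile pred = p at hsplit hstart hp
    subst hsplit
    rw [hstart]
    rw [show List.drop (p.length + 1) (p ++ s :: r) = r by simp [List.drop_append]]
    rw [List.foldl_append]
    rw [stripB_nosep _ _ hp]
    simp only [List.foldl_cons, stripB_step, beq_iff_eq, if_pos hs]
    simp [stripB_seen]
  · -- no separator line at all
    push Not at h
    rw [stripA_start_nosep ls 0 h, List.drop_zero, stripFilt_nosep ls [] h]
    have : ls.foldl stripB_step (false, []) = (false, [] ++ ls) := stripB_nosep ls [] h
    simp [this]

-- ===== VERDICT (by name: the statement is the Claim_ definition above) =====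
theorem strip_ocr_header_spec : Claim_equal_strip_ocr_header := by
  intro text _
  unfold Spec_strip_ocr_header strip_ocr_header strip_ocr_header_alt
  have h := strip_main ((PySem.Str.split? text "\n").getD [])
  simp only [stripFilt] at h
  exact congrArg (fun cs => PySem.Str.strip (PySem.Str.join "\n" cs)) h
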